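-- pv_equiv track=rewrite | github.com/qiyuebuku/crawler | 树莓派/M3u8ToMp4.py | parse_ts_url
-- ===== SOURCE A (Python) =====
-- def parse_ts_url(file_lines):
--     try:
--         for index, line in enumerate(file_lines):
--             # 找ts地址并下载
--             if "EXTINF" in line:
--                 # 拼出ts片段的URL
--                 pd_url = file_lines[index + 1]
--                 yield pd_url
--
--     except Exception as e:
--         # self.err_log.write(str(e))
--
--         return None
-- ===== SOURCE B (Python) =====
-- def parse_ts_url(file_lines):
--     # Single forward pass with an 'emit next line' flag; no positional indexing,
--     # so no look-ahead and no exception to swallow.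
--     emit_next = False
--     for line in file_lines:
--         if emit_next:
--             yield line
--         emit_next = "EXTINF" in line
-- ===== Notes on version B (the rewrite author's own statement) =====
-- stated objective: simpler
-- what changed: Replaces enumerate plus file_lines[index+1] look-ahead inside a swallow-all try/except by a single flag-threaded forward pass ('emit next line'), which needs no indexing and no exception handling.
import Mathlib
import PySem

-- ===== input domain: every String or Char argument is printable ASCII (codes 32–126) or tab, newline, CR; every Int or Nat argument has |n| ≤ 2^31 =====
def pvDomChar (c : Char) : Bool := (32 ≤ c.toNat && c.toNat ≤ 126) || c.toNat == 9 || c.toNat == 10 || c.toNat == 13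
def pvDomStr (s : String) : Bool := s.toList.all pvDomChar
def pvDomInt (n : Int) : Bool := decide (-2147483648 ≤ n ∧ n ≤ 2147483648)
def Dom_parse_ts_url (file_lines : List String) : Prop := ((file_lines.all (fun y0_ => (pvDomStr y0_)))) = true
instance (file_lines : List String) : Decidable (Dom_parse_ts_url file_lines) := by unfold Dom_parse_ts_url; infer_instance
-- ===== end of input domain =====

-- B replaces A's enumerate + file_lines[index+1] look-ahead (with a swallow-all try/except)
-- by a single flag-threaded forward pass; objective: simpler.


-- ===== PORT A =====
-- loop over enumerate(file_lines); 'yield file_lines[index+1]'; a none from pyGet?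
-- (IndexError) is caught by A's try/except, ending the generator ⇒ return what was yielded.
def parseTsGoA (file_lines : List String) : List (Int × String) → List String
  | [] => []
  | (i, line) :: rest =>
    if PySem.Str.isIn "EXTINF" line then
      match PySem.List.pyGet? file_lines (i + 1) with
      | none => []
      | some pd_url => pd_url :: parseTsGoA file_lines rest
    else parseTsGoA file_lines rest

def parse_ts_url (file_lines : List String) : List String :=
  parseTsGoA file_lines (PySem.List.enumerate file_lines)

-- ===== PORT B =====
-- flag-threaded fold: if emit_next then yield the line; new flag = "EXTINF" in line.
def parse_ts_url_alt (file_lines : List String) : List String :=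
  (file_lines.foldl
    (fun (st : List String × Bool) line =>
      let acc := if st.2 then st.1 ++ [line] else st.1
      (acc, PySem.Str.isIn "EXTINF" line))
    ([], false)).1

-- ===== PRECONDITION & SPEC =====
def Spec_parse_ts_url (file_lines : List String) (out : List String) : Prop := out = parse_ts_url_alt file_lines
instance (file_lines : List String) (out : List String) : Decidable (Spec_parse_ts_url file_lines out) := by unfold Spec_parse_ts_url; infer_instance

-- ===== CLAIM (what is proved, stated in full; the proofs are below) =====
def Claim_equal_parse_ts_url : Prop := ∀ (file_lines : List String), Dom_parse_ts_url file_lines → Spec_parse_ts_url file_lines (parse_ts_url file_lines)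

-- ===== LEMMAS AND PROOFS =====

-- reference recursion for B: emit the line when the flag is set, new flag from the line
def parseTsFB (flag : Bool) : List String → List String
  | [] => []
  | l :: ls => (if flag then [l] else []) ++ parseTsFB (PySem.Str.isIn "EXTINF" l) ls

lemma parseTsB_fold (ls : List String) : ∀ (acc : List String) (flag : Bool),
    (ls.foldl
      (fun (st : List String × Bool) line =>
        let acc := if st.2 then st.1 ++ [line] else st.1
        (acc, PySem.Str.isIn "EXTINF" line))
      (acc, flag)).1 = acc ++ parseTsFB flag ls := by
  induction ls with
  | nil => intro acc flag; simp [parseTsFB]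
  | cons l ls ih =>
    intro acc flag
    simp only [List.foldl_cons, parseTsFB, ih]
    cases flag <;> simp

-- reference recursion for A over the suffix being traversed
def parseTsFA : List String → List String
  | [] => []
  | l :: ls =>
    if PySem.Str.isIn "EXTINF" l then
      (match ls with
       | [] => []
       | n :: _ => n :: parseTsFA ls)
    else parseTsFA ls

lemma parseTsGoA_eq (rest : List String) : ∀ (pre : List String),
    parseTsGoA (pre ++ rest) (PySem.List.enumerate rest (pre.length : Int)) = parseTsFA rest := by
  induction rest with
  | nil => intro pre; simp [PySem.List.enumerate_nil, parseTsGoA, parseTsFA]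
  | cons l ls ih =>
    intro pre
    have hget : PySem.List.pyGet? (pre ++ l :: ls) ((pre.length : Int) + 1) = ls[0]? := by
      have h1 : pre ++ l :: ls = (pre ++ [l]) ++ ls := by simp
      have h2 := PySem.List.pyGet?_append_right (pre ++ [l]) ls 0
      rw [h1]
      simpa using h2
    have hrec : parseTsGoA (pre ++ l :: ls) (PySem.List.enumerate ls (↑pre.length + 1))
        = parseTsFA ls := by
      have h1 : pre ++ l :: ls = (pre ++ [l]) ++ ls := by simp
      have h2 : ((pre.length : Int) + 1) = (((pre ++ [l]).length : Nat) : Int) := by simp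
      rw [h1, h2]; exact ih (pre ++ [l])
    rw [PySem.List.enumerate_cons, parseTsGoA, hget, hrec]
    cases ls with
    | nil =>
      cases h : PySem.Chars.isIn ['E','X','T','I','N','F'] l.toList <;>
        simp [parseTsFA, PySem.Str.isIn, h]
    | cons n ls' =>
      cases h : PySem.Chars.isIn ['E','X','T','I','N','F'] l.toList <;>
        simp [parseTsFA, PySem.Str.isIn, h]

lemma parseTsFA_eq_FB (ls : List String) : ∀ (l : String),
    parseTsFA (l :: ls) = parseTsFB (PySem.Str.isIn "EXTINF" l) ls := by
  induction ls with
  | nil => intro l; simp [parseTsFA, parseTsFB]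
  | cons n ls' ih =>
    intro l
    show (if PySem.Str.isIn "EXTINF" l then n :: parseTsFA (n :: ls') else parseTsFA (n :: ls'))
        = (if PySem.Str.isIn "EXTINF" l then [n] else []) ++ parseTsFB (PySem.Str.isIn "EXTINF" n) ls'
    rw [ih n]
    cases PySem.Str.isIn "EXTINF" l <;> simp

-- ===== VERDICT (by name: the statement is the Claim_ definition above) =====
theorem parse_ts_url_spec : Claim_equal_parse_ts_url := by
  intro file_lines _
  unfold Spec_parse_ts_url parse_ts_url parse_ts_url_alt
  have hA : parseTsGoA file_lines (PySem.List.enumerate file_lines) = parseTsFA file_lines := by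
    have := parseTsGoA_eq file_lines []
    simpa using this
  rw [hA, parseTsB_fold file_lines [] false, List.nil_append]
  cases file_lines with
  | nil => rfl
  | cons l ls => rw [parseTsFA_eq_FB ls l]; simp [parseTsFB]
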